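-- pv_equiv track=rewrite | github.com/EthanGaoZhiyuan/ScaleStyle | tests/integration/test_click_feedback_loop.py | _target_category_from_baseline
-- ===== SOURCE A (Python) =====
-- from typing import Any, Dict, List, Optional, Tuple
--
-- def _target_category_from_baseline(items: List[Dict[str, Any]]) -> Tuple[str, List[str]]:
--     grouped: Dict[str, List[str]] = {}
--     for item in items:
--         item_id = str(item.get("itemId") or "").strip()
--         category = str(item.get("category") or "").strip()
--         if not item_id or not category:
--             continue
--         grouped.setdefault(category, []).append(item_id)
--
--     if not grouped:
--         return "", []
--
--     category = max(grouped.items(), key=lambda kv: len(kv[1]))[0]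
--     return category, grouped[category]
-- ===== SOURCE B (Python) =====
-- from typing import Any, Dict, List, Optional, Tuple
--
--
-- def _norm(item: Dict[str, Any], key: str) -> str:
--     return str(item.get(key) or "").strip()
--
--
-- def _target_category_from_baseline(items: List[Dict[str, Any]]) -> Tuple[str, List[str]]:
--     # First pass: count valid rows per category.
--     counts: Dict[str, int] = {}
--     for item in items:
--         item_id = _norm(item, "itemId")
--         category = _norm(item, "category")
--         if not item_id or not category:
--             continue
--         counts[category] = counts.get(category, 0) + 1
--     if not counts:
--         return "", []
--     # First key attaining the maximal count (matches max's first-on-ties rule).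
--     best = max(counts, key=counts.get)
--     # Second pass: collect the ids of the winning category.
--     ids: List[str] = []
--     for item in items:
--         item_id = _norm(item, "itemId")
--         category = _norm(item, "category")
--         if item_id and category == best:
--             ids.append(item_id)
--     return best, ids
-- ===== Notes on version B (the rewrite author's own statement) =====
-- stated objective: simpler
-- what changed: Replaces the dict-of-lists grouping with a two-pass scheme: a counter pass picks the winning category (first key attaining the maximal count), and a second pass over the input collects that category's ids, so no per-category id lists are ever built.
import Mathlib
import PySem

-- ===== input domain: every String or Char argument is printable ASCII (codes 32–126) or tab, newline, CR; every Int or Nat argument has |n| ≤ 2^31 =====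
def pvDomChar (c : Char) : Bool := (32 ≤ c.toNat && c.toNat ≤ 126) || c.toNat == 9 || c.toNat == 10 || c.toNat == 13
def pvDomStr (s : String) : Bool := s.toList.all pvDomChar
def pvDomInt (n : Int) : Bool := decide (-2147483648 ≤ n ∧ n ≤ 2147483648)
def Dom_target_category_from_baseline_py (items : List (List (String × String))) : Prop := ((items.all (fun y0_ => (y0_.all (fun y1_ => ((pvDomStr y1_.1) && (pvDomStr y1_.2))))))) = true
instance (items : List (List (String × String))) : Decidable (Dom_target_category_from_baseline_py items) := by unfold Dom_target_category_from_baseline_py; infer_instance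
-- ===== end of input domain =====

-- B replaces A's dict-of-lists grouping by a counter pass that picks the winning
-- category plus a second pass collecting its ids (objective: simpler).


-- ===== PORT A =====
-- str(item.get(k) or "").strip(): `or ""` maps both a missing key and "" to "",
-- and str on a str is the identity, so this is strip(get(k, "")); exact on strings.
-- grouped.setdefault(c, []).append(i) is the in-place d[c] = d.get(c, []) + [i],
-- i.e. Dict.modify c [] (· ++ [i]).
def target_category_from_baseline_py (items : List (List (String × String))) : String × List String :=
  let grouped : PySem.Dict String (List String) :=
    items.foldl (fun g item =>
      let item_id := PySem.Str.strip (((PySem.Dict.mk item).get? "itemId").getD "")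
      let category := PySem.Str.strip (((PySem.Dict.mk item).get? "category").getD "")
      if item_id = "" ∨ category = "" then g
      else g.modify category [] (· ++ [item_id])) PySem.Dict.empty
  if grouped.items = [] then ("", [])
  else
    match PySem.List.max? grouped.items (fun kv => (kv.2.length : Int)) with
    | none => ("", [])  -- unreachable: grouped is nonempty
    | some kv => (kv.1, grouped.getD kv.1 [])

-- ===== PORT B =====
def pvNorm (item : List (String × String)) (key : String) : String :=
  PySem.Str.strip (((PySem.Dict.mk item).get? key).getD "")

def target_category_from_baseline_py_alt (items : List (List (String × String))) : String × List String :=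
  let counts : PySem.Dict String Int :=
    items.foldl (fun d item =>
      let item_id := pvNorm item "itemId"
      let category := pvNorm item "category"
      if item_id = "" ∨ category = "" then d
      else d.insert category (d.getD category 0 + 1)) PySem.Dict.empty
  if counts.items = [] then ("", [])
  else
    match PySem.List.max? counts.keys (fun k => counts.getD k 0) with
    | none => ("", [])  -- unreachable: counts is nonempty
    | some best =>
      let ids := items.foldl (fun acc item =>
        let item_id := pvNorm item "itemId"
        let category := pvNorm item "category"
        if item_id ≠ "" ∧ category = best then acc ++ [item_id] else acc) []
      (best, ids)

-- ===== PRECONDITION & SPEC =====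
def Spec_target_category_from_baseline_py (items : List (List (String × String))) (out : String × List String) : Prop := out = target_category_from_baseline_py_alt items
instance (items : List (List (String × String))) (out : String × List String) : Decidable (Spec_target_category_from_baseline_py items out) := by unfold Spec_target_category_from_baseline_py; infer_instance

-- ===== CLAIM (what is proved, stated in full; the proofs are below) =====
def Claim_equal_target_category_from_baseline_py : Prop := ∀ (items : List (List (String × String))), Dom_target_category_from_baseline_py items → Spec_target_category_from_baseline_py items (target_category_from_baseline_py items)

-- ===== LEMMAS AND PROOFS =====

-- The (category, itemId) pairs of the valid rows, in input order.
def pvPairs (items : List (List (String × String))) : List (String × String) :=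
  items.filterMap (fun item =>
    let i := pvNorm item "itemId"
    let c := pvNorm item "category"
    if i = "" ∨ c = "" then none else some (c, i))

-- ids of category c, key order, and the common key function
def pvG (ps : List (String × String)) (c : String) : List String :=
  (ps.filter (fun p => p.1 == c)).map (·.2)

def pvK (ps : List (String × String)) : List String :=
  PySem.Set.ofList (ps.map (·.1))

def pvKey (ps : List (String × String)) (c : String) : Int :=
  (ps.countP (fun p => p.1 == c) : Int)

lemma pvPairs_fst_ne {items : List (List (String × String))} {p : String × String}
    (hp : p ∈ pvPairs items) : p.1 ≠ "" := by
  simp only [pvPairs, List.mem_filterMap] at hp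
  obtain ⟨item, _, h⟩ := hp
  by_cases hc : pvNorm item "itemId" = "" ∨ pvNorm item "category" = ""
  · simp [hc] at h
  · simp only [if_neg hc, Option.some.injEq] at h
    subst h
    exact fun hc2 => hc (Or.inr hc2)

-- max? over a mapped list
lemma pv_max?_map {α β κ : Type} [LT κ] [DecidableLT κ] (f : α → β) (xs : List α) (key : β → κ) :
    PySem.List.max? (xs.map f) key = (PySem.List.max? xs (fun a => key (f a))).map f := by
  have aux : ∀ (ys : List α) (acc : Option α),
      ys.foldl (fun acc x => match acc with
        | none => some (f x)
        | some m => if key m < key (f x) then some (f x) else some m) (acc.map f)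
      = (ys.foldl (fun acc x => match acc with
          | none => some x
          | some m => if key (f m) < key (f x) then some x else some m) acc).map f := by
    intro ys
    induction ys with
    | nil => intro acc; rfl
    | cons y ys ih =>
      intro acc
      cases acc with
      | none => simpa using ih (some y)
      | some m =>
        simp only [List.foldl_cons]
        by_cases h : key (f m) < key (f y)
        · simpa [h] using ih (some y)
        · simpa [h] using ih (some m)
  simpa [PySem.List.max?, List.foldl_map] using aux xs none

-- A's grouping fold over the raw rows is the canonical fold over the valid pairs.
lemma pv_foldA (items : List (List (String × String))) (g : PySem.Dict String (List String)) :
    items.foldl (fun g item =>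
      let item_id := PySem.Str.strip (((PySem.Dict.mk item).get? "itemId").getD "")
      let category := PySem.Str.strip (((PySem.Dict.mk item).get? "category").getD "")
      if item_id = "" ∨ category = "" then g
      else g.modify category [] (· ++ [item_id])) g
    = (pvPairs items).foldl (fun g p => g.modify p.1 [] (· ++ [p.2])) g := by
  induction items generalizing g with
  | nil => rfl
  | cons item items ih =>
    by_cases hc : pvNorm item "itemId" = "" ∨ pvNorm item "category" = "" <;>
      simp only [List.foldl_cons, pvPairs, List.filterMap_cons, pvNorm] at * <;>
      simp [hc, ih]

-- B's counting fold likewise.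
lemma pv_foldB (items : List (List (String × String))) (d : PySem.Dict String Int) :
    items.foldl (fun d item =>
      let item_id := pvNorm item "itemId"
      let category := pvNorm item "category"
      if item_id = "" ∨ category = "" then d
      else d.insert category (d.getD category 0 + 1)) d
    = (pvPairs items).foldl (fun d p => d.insert p.1 (d.getD p.1 0 + 1)) d := by
  induction items generalizing d with
  | nil => rfl
  | cons item items ih =>
    by_cases hc : pvNorm item "itemId" = "" ∨ pvNorm item "category" = "" <;>
      simp only [List.foldl_cons, pvPairs, List.filterMap_cons] at * <;>
      simp [hc, ih]

-- B's second pass collects exactly the winning category's ids (best ≠ "").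
lemma pv_foldIds (items : List (List (String × String))) (best : String) (hb : best ≠ "")
    (acc : List String) :
    items.foldl (fun acc item =>
      let item_id := pvNorm item "itemId"
      let category := pvNorm item "category"
      if item_id ≠ "" ∧ category = best then acc ++ [item_id] else acc) acc
    = acc ++ pvG (pvPairs items) best := by
  induction items generalizing acc with
  | nil => simp [pvPairs, pvG]
  | cons item items ih =>
    simp only [List.foldl_cons, pvPairs, List.filterMap_cons] at *
    by_cases hi : pvNorm item "itemId" = ""
    · simp [hi, ih]
    · by_cases hcat : pvNorm item "category" = best
      · have hc : ¬(pvNorm item "itemId" = "" ∨ pvNorm item "category" = "") := by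
          rintro (h | h)
          · exact hi h
          · exact hb (hcat ▸ h)
        simp [hi, hcat, hb, pvG, ih]
      · by_cases hcc : pvNorm item "category" = ""
        · simp [hi, hcc, hb, pvG, ih]
        · have hc : ¬(pvNorm item "itemId" = "" ∨ pvNorm item "category" = "") := by
            rintro (h | h)
            · exact hi h
            · exact hcc h
          have hcond : ¬(pvNorm item "itemId" ≠ "" ∧ pvNorm item "category" = best) :=
            fun h => hcat h.2
          rw [if_neg hcond, if_neg hc]
          simp [hcat, pvG, ih]

-- canonical form of A
lemma pv_A_eq (items : List (List (String × String))) :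
    target_category_from_baseline_py items
    = match PySem.List.max? (pvK (pvPairs items)) (pvKey (pvPairs items)) with
      | none => ("", [])
      | some best => (best, pvG (pvPairs items) best) := by
  unfold target_category_from_baseline_py
  rw [pv_foldA]
  set ps := pvPairs items with hps
  set G := ps.foldl (fun g p => g.modify p.1 [] (· ++ [p.2])) PySem.Dict.empty with hG
  have hnd : G.keys.Nodup :=
    PySem.Dict.nodup_keys_foldl_modify_key ps (·.1) [] (fun d p => (· ++ [p.2]))
      PySem.Dict.empty (by simp [PySem.Dict.keys_empty])
  have hkeys : G.keys = pvK ps := by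
    rw [hG, PySem.Dict.keys_foldl_modify_key ps (·.1) [] (fun d p => (· ++ [p.2])) PySem.Dict.empty]
    simp [PySem.Dict.keys_empty, PySem.Set.update_nil_left, pvK]
  have hget : ∀ c, G.getD c [] = pvG ps c := by
    intro c
    rw [hG, PySem.Dict.getD_foldl_modify_append]
    simp [pvG, PySem.Dict.getD_empty]
  have hitemsmap : G.items = (pvK ps).map (fun k => (k, pvG ps k)) := by
    rw [PySem.Dict.items_eq_map_keys G hnd [], hkeys]
    exact List.map_congr_left (fun k _ => by rw [hget])
  cases hmax : PySem.List.max? (pvK ps) (pvKey ps) with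
  | none =>
    have hk : pvK ps = [] := (PySem.List.max?_eq_none_iff _ _).mp hmax
    have hit : G.items = [] := by simp [hitemsmap, hk]
    simp [hit]
  | some best =>
    have hit : ¬ (G.items = []) := by
      intro h
      rw [h] at hitemsmap
      have : pvK ps = [] := by
        rcases List.map_eq_nil_iff.mp hitemsmap.symm with h'
        exact h'
      rw [(PySem.List.max?_eq_none_iff _ _).mpr this] at hmax
      simp at hmax
    rw [if_neg hit]
    rw [hitemsmap, pv_max?_map (fun k => (k, pvG ps k)) (pvK ps) (fun kv => (kv.2.length : Int))]
    have hklen : (fun a => (((fun k => (k, pvG ps k)) a).2.length : Int)) = pvKey ps := by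
      funext c
      simp [pvG, pvKey, List.countP_eq_length_filter]
    rw [hklen, hmax]
    simp [hget]

-- canonical form of B
lemma pv_B_eq (items : List (List (String × String))) :
    target_category_from_baseline_py_alt items
    = match PySem.List.max? (pvK (pvPairs items)) (pvKey (pvPairs items)) with
      | none => ("", [])
      | some best => (best, pvG (pvPairs items) best) := by
  unfold target_category_from_baseline_py_alt
  rw [pv_foldB]
  set ps := pvPairs items with hps
  set C : PySem.Dict String Int := ps.foldl (fun d p => d.insert p.1 (d.getD p.1 0 + 1)) PySem.Dict.empty with hC
  have hkeys : C.keys = pvK ps := by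
    rw [hC, PySem.Dict.keys_foldl_insert_key ps (·.1) (fun d p => d.getD p.1 0 + 1)
      PySem.Dict.empty]
    simp [PySem.Dict.keys_empty, PySem.Set.update_nil_left, pvK]
  have hget : (fun k => C.getD k 0) = pvKey ps := by
    funext k
    have hfold : (ps.map (·.1)).foldl
        (fun d x => PySem.Dict.insert d x (d.getD x 0 + 1))
        (PySem.Dict.empty : PySem.Dict String Int)
        = ps.foldl (fun d p => PySem.Dict.insert d p.1 (d.getD p.1 0 + 1)) PySem.Dict.empty := by
      rw [List.foldl_map]
    rw [hC, ← hfold, PySem.Dict.getD_foldl_insert_add_one]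
    simp [pvKey, PySem.Dict.getD_empty, List.count_eq_countP, List.countP_map]
    rfl
  have hitems0 : C.items = [] ↔ pvK ps = [] := by
    rw [← hkeys]
    simp only [PySem.Dict.keys]
    exact List.map_eq_nil_iff.symm
  cases hmax : PySem.List.max? (pvK ps) (pvKey ps) with
  | none =>
    have hit : C.items = [] := hitems0.mpr ((PySem.List.max?_eq_none_iff _ _).mp hmax)
    simp [hit]
  | some best =>
    have hit : ¬ (C.items = []) := by
      intro h
      rw [(PySem.List.max?_eq_none_iff _ _).mpr (hitems0.mp h)] at hmax
      simp at hmax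
    rw [if_neg hit, hkeys, hget, hmax]
    have hb : best ≠ "" := by
      have hmem : best ∈ pvK ps := PySem.List.max?_mem hmax
      have hm2 : best ∈ ps.map (·.1) := by
        have := (PySem.Set.mem_ofList (xs := ps.map (·.1)) (y := best)).mp (by simpa [pvK] using hmem)
        exact this
      rcases List.mem_map.mp hm2 with ⟨p, hp, hpe⟩
      rw [hps] at hp
      exact hpe ▸ pvPairs_fst_ne hp
    simp [pv_foldIds items best hb []]
    rw [hps]

-- ===== VERDICT (by name: the statement is the Claim_ definition above) =====
theorem target_category_from_baseline_py_spec : Claim_equal_target_category_from_baseline_py := by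
  intro items _
  unfold Spec_target_category_from_baseline_py
  rw [pv_A_eq, pv_B_eq]
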